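-- pv_equiv track=rewrite | github.com/spartow/grader-validation-protocol | scripts/cross_evaluator_analysis.py | compute_pass_rate
-- ===== SOURCE A (Python) =====
-- def compute_pass_rate(labels, keys):
--     """Compute pass rate for a set of labels."""
--     passes = total = 0
--     for k in keys:
--         v = labels.get(k)
--         if v:
--             total += 1
--             if v == "pass":
--                 passes += 1
--     return passes, total
-- ===== SOURCE B (Python) =====
-- def compute_pass_rate(labels, keys):
--     """Compute pass rate via a frequency table of the looked-up values."""
--     counts = {}
--     for k in keys:
--         v = labels.get(k)
--         counts[v] = counts.get(v, 0) + 1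
--     passes = counts.get("pass", 0)
--     total = sum(n for v, n in counts.items() if v)
--     return passes, total
-- ===== Notes on version B (the rewrite author's own statement) =====
-- stated objective: alternative
-- what changed: B first aggregates the looked-up label values into a frequency table (dict of value -> count) and then tallies passes and truthy totals over the distinct values, instead of A's single per-key branching accumulator loop.
import Mathlib
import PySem

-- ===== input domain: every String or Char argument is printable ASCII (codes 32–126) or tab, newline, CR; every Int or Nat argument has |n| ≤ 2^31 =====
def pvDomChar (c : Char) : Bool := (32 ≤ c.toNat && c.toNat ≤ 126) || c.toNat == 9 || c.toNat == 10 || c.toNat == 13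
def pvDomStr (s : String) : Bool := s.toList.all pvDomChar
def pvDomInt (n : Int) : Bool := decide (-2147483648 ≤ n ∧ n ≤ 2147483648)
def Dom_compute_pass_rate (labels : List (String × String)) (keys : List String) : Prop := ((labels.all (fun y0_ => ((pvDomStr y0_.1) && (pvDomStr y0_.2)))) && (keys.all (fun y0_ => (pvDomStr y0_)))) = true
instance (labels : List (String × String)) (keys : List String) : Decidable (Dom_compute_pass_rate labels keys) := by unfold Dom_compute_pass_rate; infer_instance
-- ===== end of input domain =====

-- ===== PORT A =====
-- B aggregates the looked-up values into a frequency table first, then tallies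
-- over distinct values; A keeps a running (passes, total) accumulator per key.
-- Python truthiness of labels.get(k) (None or str): not None and not "".
def pvTruthy (v : Option String) : Bool :=
  match v with
  | none => false
  | some s => decide (s ≠ "")

def compute_pass_rate (labels : List (String × String)) (keys : List String) : Int × Int :=
  keys.foldl (fun pt k =>
    let v := (PySem.Dict.ofList labels).get? k
    if pvTruthy v then
      ((if v == some "pass" then pt.1 + 1 else pt.1), pt.2 + 1)
    else pt) (0, 0)

-- ===== PORT B =====
def compute_pass_rate_alt (labels : List (String × String)) (keys : List String) : Int × Int :=
  let counts : PySem.Dict (Option String) Int :=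
    keys.foldl (fun d k =>
      let v := (PySem.Dict.ofList labels).get? k
      d.insert v (d.getD v 0 + 1)) PySem.Dict.empty
  let passes := counts.getD (some "pass") 0
  let total := (counts.items.map (fun vn => if pvTruthy vn.1 then vn.2 else 0)).sum
  (passes, total)

-- ===== PRECONDITION & SPEC =====
def Spec_compute_pass_rate (labels : List (String × String)) (keys : List String) (out : Int × Int) : Prop := out = compute_pass_rate_alt labels keys
instance (labels : List (String × String)) (keys : List String) (out : Int × Int) : Decidable (Spec_compute_pass_rate labels keys out) := by unfold Spec_compute_pass_rate; infer_instance

-- ===== CLAIM (what is proved, stated in full; the proofs are below) =====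
def Claim_equal_compute_pass_rate : Prop := ∀ (labels : List (String × String)) (keys : List String), Dom_compute_pass_rate labels keys → Spec_compute_pass_rate labels keys (compute_pass_rate labels keys)

-- ===== LEMMAS AND PROOFS =====

-- A's accumulator loop computes (count of "pass" values, count of truthy values).
theorem pvAfold (f : String → Option String) (keys : List String) (p t : Int) :
    keys.foldl (fun pt k =>
      if pvTruthy (f k) then
        ((if f k == some "pass" then pt.1 + 1 else pt.1), pt.2 + 1)
      else pt) (p, t)
    = (p + ((keys.map f).count (some "pass") : Int), t + ((keys.map f).countP pvTruthy : Int)) := by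
  induction keys generalizing p t with
  | nil => simp
  | cons k ks ih =>
    rw [List.foldl_cons]
    by_cases ht : pvTruthy (f k) = true
    · rw [if_pos ht]
      by_cases hp : (f k == some "pass") = true
      · rw [if_pos hp, ih]
        have hv : f k = some "pass" := by simpa using hp
        refine Prod.ext ?_ ?_ <;>
          simp [pvTruthy, hv] <;> omega
      · rw [if_neg (by simpa using hp), ih]
        refine Prod.ext ?_ ?_ <;>
          simp [List.count_cons, ht, hp] <;> push_cast <;> omega
    · rw [if_neg ht, ih]
      have hp : ¬ (f k = some "pass") := by
        intro hv; apply ht; rw [hv]; rfl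
      refine Prod.ext ?_ ?_ <;>
        simp [List.count_cons, ht, hp]

-- B's loop builds Counter(values).
theorem pvBfold (f : String → Option String) (keys : List String) :
    keys.foldl (fun (d : PySem.Dict (Option String) Int) k =>
      d.insert (f k) (d.getD (f k) 0 + 1)) PySem.Dict.empty
    = PySem.Dict.counter (keys.map f) := by
  rw [← PySem.Dict.foldl_insert_getD_add_one_eq_counter]
  simp [List.foldl_map]

-- Summing 'if x == v then c else 0' over a nodup list containing x gives c.
theorem pvSumSingle {α : Type} [BEq α] [LawfulBEq α] (u : List α) (x : α) (c : Int)
    (hu : u.Nodup) (hx : x ∈ u) :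
    (u.map (fun v => if x == v then c else 0)).sum = c := by
  induction u with
  | nil => cases hx
  | cons h u ih =>
    rcases List.nodup_cons.mp hu with ⟨hh, hu'⟩
    rcases List.mem_cons.mp hx with rfl | hx'
    · have hz : (u.map (fun v => if x == v then c else 0)).sum = 0 := by
        rw [List.sum_eq_zero]
        intro y hy
        rcases List.mem_map.mp hy with ⟨v, hv, rfl⟩
        have : ¬ (x = v) := fun he => hh (he ▸ hv)
        simp [this]
      simp [hz]
    · have hhx : ¬ (x = h) := fun he => hh (he ▸ hx')
      simp [hhx, ih hu' hx']

-- The central tally lemma: summing the filtered whole-list counts over any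
-- nodup cover of the p-elements equals countP.
theorem pvCountSum {α : Type} [BEq α] [LawfulBEq α] (p : α → Bool) (xs : List α) :
    ∀ (u : List α), u.Nodup → (∀ x ∈ xs, p x = true → x ∈ u) →
    (u.map (fun v => if p v then (xs.count v : Int) else 0)).sum = (xs.countP p : Int) := by
  induction xs with
  | nil => intro u _ _; simp
  | cons x xs ih =>
    intro u hu hcov
    have hstep : (fun v => if p v then ((x :: xs).count v : Int) else 0)
        = (fun v => (if p v then (xs.count v : Int) else 0)
            + (if p x then (if x == v then (1 : Int) else 0) else 0)) := by
      funext v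
      simp only [List.count_cons]
      by_cases hpv : p v = true
      · by_cases hvx : x = v
        · subst hvx; simp [hpv]
        · simp [hpv, hvx]
      · by_cases hvx : x = v
        · have hpx : ¬ (p x = true) := by subst hvx; exact hpv
          simp [hpv, hpx]
        · simp [hpv, hvx]
    rw [hstep, PySem.List.sum_map_add_int,
        ih u hu (fun y hy hpy => hcov y (List.mem_cons_of_mem x hy) hpy),
        List.countP_cons]
    by_cases hpx : p x = true
    · simp only [hpx, if_true]
      rw [pvSumSingle u x 1 hu (hcov x (List.mem_cons_self) hpx)]
      push_cast; ring
    · simp [hpx]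

-- ===== VERDICT (by name: the statement is the Claim_ definition above) =====
theorem compute_pass_rate_spec : Claim_equal_compute_pass_rate := by
  intro labels keys _
  show compute_pass_rate labels keys = compute_pass_rate_alt labels keys
  set f : String → Option String := fun k => (PySem.Dict.ofList labels).get? k with hf
  have hL : compute_pass_rate labels keys =
      keys.foldl (fun pt k =>
        if pvTruthy (f k) then
          ((if f k == some "pass" then pt.1 + 1 else pt.1), pt.2 + 1)
        else pt) (0, 0) := rfl
  have hR : compute_pass_rate_alt labels keys =
      ((keys.foldl (fun (d : PySem.Dict (Option String) Int) k =>
          d.insert (f k) (d.getD (f k) 0 + 1)) PySem.Dict.empty).getD (some "pass") 0,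
       ((keys.foldl (fun (d : PySem.Dict (Option String) Int) k =>
          d.insert (f k) (d.getD (f k) 0 + 1)) PySem.Dict.empty).items.map
            (fun vn => if pvTruthy vn.1 then vn.2 else 0)).sum) := rfl
  rw [hL, hR, pvAfold f keys 0 0, pvBfold f keys,
      PySem.Dict.getD_counter, PySem.Dict.items_counter, List.map_map]
  refine Prod.ext (by simp) ?_
  have hcomp : ((fun vn : Option String × Int => if pvTruthy vn.1 then vn.2 else 0) ∘
        (fun v : Option String => (v, ((keys.map f).count v : Int))))
      = (fun v => if pvTruthy v then ((keys.map f).count v : Int) else 0) := by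
    funext v; rfl
  show (0 : Int) + ((keys.map f).countP pvTruthy : Int)
      = ((PySem.Set.ofList (keys.map f)).map
          ((fun vn : Option String × Int => if pvTruthy vn.1 then vn.2 else 0) ∘
            (fun v => (v, ((keys.map f).count v : Int))))).sum
  rw [zero_add, hcomp, pvCountSum pvTruthy (keys.map f) (PySem.Set.ofList (keys.map f))
      (PySem.Set.nodup_ofList _) (fun x hx _ => (PySem.Set.mem_ofList _ x).mpr hx)]
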